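-- pv_equiv track=rewrite | github.com/MastewalB/a2sv-competitive-programming | Contest/Camp-Contest/C-6/A.py | maxDollar
-- ===== SOURCE A (Python) =====
-- def maxDollar(pylons, N):
--     dollars = pylons[0]
--     energy = 0
--
--     for i in range(1, N):
--         if pylons[i] > pylons[i - 1] + energy:
--             dollars += pylons[i] - (pylons[i - 1] + energy)
--             energy = 0
--         else:
--             energy += pylons[i - 1] - pylons[i]
--     return dollars
-- ===== SOURCE B (Python) =====
-- def maxDollar(pylons, N):
--     best = pylons[0]
--     for i in range(1, N):
--         if pylons[i] > best:
--             best = pylons[i]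
--     return best
-- ===== Notes on version B (the rewrite author's own statement) =====
-- stated objective: simpler
-- what changed: Replaced the dollars/energy telescoping accumulator pair (two state variables, additions and subtractions per step) with a single running-maximum variable, since the invariant dollars = pylons[i-1] + energy makes A's result the maximum of pylons[0..N-1].
import Mathlib
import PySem

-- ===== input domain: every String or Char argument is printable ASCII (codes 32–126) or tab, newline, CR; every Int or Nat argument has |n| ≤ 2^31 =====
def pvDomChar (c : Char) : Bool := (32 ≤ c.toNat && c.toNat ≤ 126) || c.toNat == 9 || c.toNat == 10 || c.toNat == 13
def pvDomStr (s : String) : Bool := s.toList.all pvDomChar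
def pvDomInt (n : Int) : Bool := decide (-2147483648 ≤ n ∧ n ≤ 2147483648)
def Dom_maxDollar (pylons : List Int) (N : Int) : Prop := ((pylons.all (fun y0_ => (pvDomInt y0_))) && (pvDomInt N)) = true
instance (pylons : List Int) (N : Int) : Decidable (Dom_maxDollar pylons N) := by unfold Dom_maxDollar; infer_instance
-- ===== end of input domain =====

-- B replaces A's dollars/energy accumulator pair with a single running maximum (simpler, same cost).

-- ===== PORT A =====
-- literal port of A: state (dollars, energy), loop for i in range(1, N)
def maxDollar (pylons : List Int) (N : Int) : Int :=
  ((PySem.List.pyRange 1 N 1).foldl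
    (fun (s : Int × Int) i =>
      let cur := PySem.List.pyGetD pylons i 0
      let prev := PySem.List.pyGetD pylons (i - 1) 0
      if cur > prev + s.2 then (s.1 + (cur - (prev + s.2)), 0)
      else (s.1, s.2 + (prev - cur)))
    (PySem.List.pyGetD pylons 0 0, 0)).1

-- ===== PORT B =====
-- literal port of B: best = pylons[0]; for i in range(1, N): if pylons[i] > best: best = pylons[i]
def maxDollar_alt (pylons : List Int) (N : Int) : Int :=
  (PySem.List.pyRange 1 N 1).foldl
    (fun best i =>
      let cur := PySem.List.pyGetD pylons i 0
      if cur > best then cur else best)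
    (PySem.List.pyGetD pylons 0 0)

-- ===== PRECONDITION & SPEC =====
-- Pre_ excludes exactly the inputs on which the Python A raises IndexError
-- (empty list at pylons[0], or N beyond the list length); B raises there identically.
def Pre_maxDollar (pylons : List Int) (N : Int) : Prop :=
  pylons ≠ [] ∧ N ≤ (pylons.length : Int)
instance (pylons : List Int) (N : Int) : Decidable (Pre_maxDollar pylons N) := by
  unfold Pre_maxDollar; infer_instance

def pvWitness_maxDollar : List Int × Int := ([3, 1, 4, 1, 5], 5)

def Spec_maxDollar (pylons : List Int) (N : Int) (out : Int) : Prop := out = maxDollar_alt pylons N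
instance (pylons : List Int) (N : Int) (out : Int) : Decidable (Spec_maxDollar pylons N out) := by
  unfold Spec_maxDollar; infer_instance

-- ===== CLAIM (what is proved, stated in full; the proofs are below) =====
def Claim_equal_maxDollar : Prop := ∀ (pylons : List Int) (N : Int), Dom_maxDollar pylons N → Pre_maxDollar pylons N → Spec_maxDollar pylons N (maxDollar pylons N)

-- ===== LEMMAS AND PROOFS =====

-- Loop invariant: if dollars = pylons[a-1] + energy entering the loop at index a,
-- then A's fold over range(a, N) returns the same first component as B's fold from dollars.
theorem maxDollar_fold_eq (pylons : List Int) (N : Int) :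
    ∀ (n : Nat) (a d e : Int), (N - a).toNat = n →
      d = PySem.List.pyGetD pylons (a - 1) 0 + e →
      ((PySem.List.pyRange a N 1).foldl
        (fun (s : Int × Int) i =>
          let cur := PySem.List.pyGetD pylons i 0
          let prev := PySem.List.pyGetD pylons (i - 1) 0
          if cur > prev + s.2 then (s.1 + (cur - (prev + s.2)), 0)
          else (s.1, s.2 + (prev - cur)))
        (d, e)).1
      =
      (PySem.List.pyRange a N 1).foldl
        (fun best i =>
          let cur := PySem.List.pyGetD pylons i 0
          if cur > best then cur else best)
        d := by
  intro n
  induction n with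
  | zero =>
    intro a d e hn _
    rw [PySem.List.pyRange_one_eq_nil (by omega)]
    rfl
  | succ k ih =>
    intro a d e hn hd
    rw [PySem.List.pyRange_one_cons (by omega)]
    simp only [List.foldl_cons]
    set cur := PySem.List.pyGetD pylons a 0 with hcur
    set prev := PySem.List.pyGetD pylons (a - 1) 0 with hprev
    by_cases hc : cur > prev + e
    · rw [if_pos hc, if_pos (by omega)]
      have h1 : d + (cur - (prev + e)) = cur := by omega
      rw [h1]
      exact ih (a + 1) cur 0 (by omega)
        (by rw [hcur, add_sub_cancel_right]; ring)
    · rw [if_neg hc, if_neg (by omega)]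
      exact ih (a + 1) d (e + (prev - cur)) (by omega)
        (by rw [hcur, hprev] at *; rw [add_sub_cancel_right]; omega)

-- ===== VERDICT (by name: the statement is the Claim_ definition above) =====
theorem maxDollar_spec : Claim_equal_maxDollar := by
  intro pylons N _ _
  unfold Spec_maxDollar maxDollar maxDollar_alt
  exact maxDollar_fold_eq pylons N (N - 1).toNat 1 (PySem.List.pyGetD pylons 0 0) 0
    rfl (by simp)
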